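-- pv_equiv track=rewrite | github.com/Jdavidruanob/Assignment-III | simulation.py | run_scan
-- ===== SOURCE A (Python) =====
-- MAX_CYLINDERS = 5000 # 0 a 4999
--
-- def run_scan(start_pos, requests, direction="up"):
--     """
--     Simula el algoritmo SCAN (Elevador).
--     La direccion ("up" o "down") determina el movimiento inicial.
--     """
--     total_movement = 0
--     current_pos = start_pos
--     path = [current_pos] # Lista para guardar la ruta
--
--     # Copiamos y ordenamos las solicitudes
--     requests_copy = sorted(requests)
--
--     if direction == "up":
--         # 1. Separar solicitudes "hacia arriba" y "hacia abajo"
--         up_requests = sorted([r for r in requests_copy if r >= current_pos])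
--         down_requests = sorted([r for r in requests_copy if r < current_pos], reverse=True) # Descendente
--
--         # 2. Moverse "hacia arriba" atendiendo solicitudes
--         for req in up_requests:
--             total_movement += abs(req - current_pos)
--             current_pos = req
--             path.append(current_pos)
--
--         # 3. Moverse al final del disco (4999)
--         if not up_requests or up_requests[-1] != (MAX_CYLINDERS - 1):
--             total_movement += abs((MAX_CYLINDERS - 1) - current_pos)
--             current_pos = MAX_CYLINDERS - 1
--             path.append(current_pos)
--
--         # 4. Moverse "hacia abajo" atendiendo el resto
--         for req in down_requests:
--             total_movement += abs(req - current_pos)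
--             current_pos = req
--             path.append(current_pos)
--
--     else: # direction == "down"
--         # 1. Separar solicitudes "hacia abajo" y "hacia arriba"
--         down_requests = sorted([r for r in requests_copy if r <= current_pos], reverse=True) # Descendente
--         up_requests = sorted([r for r in requests_copy if r > current_pos]) # Ascendente
--
--         # 2. Moverse "hacia abajo" atendiendo solicitudes
--         for req in down_requests:
--             total_movement += abs(req - current_pos)
--             current_pos = req
--             path.append(current_pos)
--
--         # 3. Moverse al inicio del disco (0)
--         if not down_requests or down_requests[-1] != 0:
--             total_movement += abs(0 - current_pos)
--             current_pos = 0
--             path.append(current_pos)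
--
--         # 4. Moverse "hacia arriba" atendiendo el resto
--         for req in up_requests:
--             total_movement += abs(req - current_pos)
--             current_pos = req
--             path.append(current_pos)
--
--     return total_movement, path
-- ===== SOURCE B (Python) =====
-- MAX_CYLINDERS = 5000 # 0 a 4999
--
-- def run_scan(start_pos, requests, direction="up"):
--     # Partition in one pass, sort each half once, build the path by concatenation
--     # and compute the total movement in closed form from the extremes (O(1) after
--     # sorting): the sweep is monotone, so distances telescope.
--     low, high = [], []
--     for r in requests:
--         (low if (r < start_pos or (r == start_pos and direction != "up")) else high).append(r)
--     low.sort()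
--     high.sort()
--     if direction == "up":
--         edge = MAX_CYLINDERS - 1
--         u = high[-1] if high else start_pos
--         total = (u - start_pos) + abs(edge - u)
--         if low:
--             total += abs(low[-1] - edge) + (low[-1] - low[0])
--         stops = high + ([edge] if not high or high[-1] != edge else []) + low[::-1]
--     else:
--         l = low[0] if low else start_pos
--         total = (start_pos - l) + abs(l)
--         if high:
--             total += abs(high[0]) + (high[-1] - high[0])
--         stops = low[::-1] + ([0] if not low or low[0] != 0 else []) + high
--     return total, [start_pos] + stops
-- ===== Notes on version B (the rewrite author's own statement) =====
-- stated objective: alternative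
-- what changed: B partitions the requests in one pass and sorts each half once (instead of sorting the whole list, filtering it twice and re-sorting each filtered copy), builds the path purely by list concatenation with no per-stop loop, and computes the total movement in closed form from the extremes of the two halves (the sweep is monotone so distances telescope), eliminating A's per-request movement accumulation entirely.
import Mathlib
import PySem

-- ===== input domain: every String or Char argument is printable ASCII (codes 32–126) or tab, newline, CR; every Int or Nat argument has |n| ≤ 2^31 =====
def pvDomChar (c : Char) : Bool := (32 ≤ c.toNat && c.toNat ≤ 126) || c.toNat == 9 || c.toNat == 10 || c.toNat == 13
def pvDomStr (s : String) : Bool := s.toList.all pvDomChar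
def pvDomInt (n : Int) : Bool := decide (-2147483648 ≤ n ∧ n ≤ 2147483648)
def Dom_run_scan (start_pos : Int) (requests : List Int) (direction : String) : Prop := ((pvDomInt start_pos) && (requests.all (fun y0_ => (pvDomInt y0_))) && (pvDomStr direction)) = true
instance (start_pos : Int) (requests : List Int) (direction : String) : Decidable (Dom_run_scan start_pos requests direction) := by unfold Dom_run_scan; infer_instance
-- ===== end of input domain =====

-- B partitions once, sorts each half, builds the path by concatenation and gets the
-- total movement in closed form from the extremes (the sweep is monotone, distances
-- telescope) instead of A's per-request accumulation loops (objective: alternative).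

-- ===== PORT A =====
-- the body of both 'for req in …' loops of A: state (total_movement, current_pos, path)
def pvStepA (s : Int × Int × List Int) (req : Int) : Int × Int × List Int :=
  (s.1 + |req - s.2.1|, req, s.2.2 ++ [req])

def run_scan (start_pos : Int) (requests : List Int) (direction : String) : Int × List Int :=
  -- total_movement = 0, current_pos = start_pos, path = [current_pos]
  let requests_copy := PySem.List.sorted requests (fun r => r) false
  if direction == "up" then
    let up_requests := PySem.List.sorted (requests_copy.filter (fun r => decide (r ≥ start_pos))) (fun r => r) false
    let down_requests := PySem.List.sorted (requests_copy.filter (fun r => decide (r < start_pos))) (fun r => r) true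
    let s1 := up_requests.foldl pvStepA (0, start_pos, [start_pos])
    let s2 := if up_requests = [] ∨ up_requests.getLast? ≠ some (4999 : Int) then
                (s1.1 + |(4999 : Int) - s1.2.1|, (4999 : Int), s1.2.2 ++ [(4999 : Int)])
              else s1
    let s3 := down_requests.foldl pvStepA s2
    (s3.1, s3.2.2)
  else
    let down_requests := PySem.List.sorted (requests_copy.filter (fun r => decide (r ≤ start_pos))) (fun r => r) true
    let up_requests := PySem.List.sorted (requests_copy.filter (fun r => decide (r > start_pos))) (fun r => r) false
    let s1 := down_requests.foldl pvStepA (0, start_pos, [start_pos])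
    let s2 := if down_requests = [] ∨ down_requests.getLast? ≠ some (0 : Int) then
                (s1.1 + |(0 : Int) - s1.2.1|, (0 : Int), s1.2.2 ++ [(0 : Int)])
              else s1
    let s3 := up_requests.foldl pvStepA s2
    (s3.1, s3.2.2)

-- ===== PORT B =====
def run_scan_alt (start_pos : Int) (requests : List Int) (direction : String) : Int × List Int :=
  -- one-pass partition into low / high (appending, as the Python loop does)
  let p := requests.foldl
    (fun (s : List Int × List Int) r =>
      if r < start_pos ∨ (r = start_pos ∧ direction ≠ "up") then (s.1 ++ [r], s.2)
      else (s.1, s.2 ++ [r]))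
    ([], [])
  let low := PySem.List.sorted p.1 (fun r => r) false
  let high := PySem.List.sorted p.2 (fun r => r) false
  if direction == "up" then
    let u := high.getLastD start_pos                      -- high[-1] if high else start_pos
    let total := (u - start_pos) + |(4999 : Int) - u| +
      (if low ≠ [] then |low.getLastD 0 - 4999| + (low.getLastD 0 - low.headD 0) else 0)
    let stops := high ++ (if high = [] ∨ high.getLast? ≠ some (4999 : Int) then [(4999 : Int)] else []) ++ low.reverse
    (total, start_pos :: stops)
  else
    let l := low.headD start_pos                          -- low[0] if low else start_pos
    let total := (start_pos - l) + |l| +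
      (if high ≠ [] then |high.headD 0| + (high.getLastD 0 - high.headD 0) else 0)
    let stops := low.reverse ++ (if low = [] ∨ low.head? ≠ some (0 : Int) then [(0 : Int)] else []) ++ high
    (total, start_pos :: stops)

-- ===== PRECONDITION & SPEC =====
def Spec_run_scan (start_pos : Int) (requests : List Int) (direction : String) (out : Int × List Int) : Prop := out = run_scan_alt start_pos requests direction
instance (start_pos : Int) (requests : List Int) (direction : String) (out : Int × List Int) : Decidable (Spec_run_scan start_pos requests direction out) := by unfold Spec_run_scan; infer_instance

-- ===== CLAIM (what is proved, stated in full; the proofs are below) =====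
def Claim_equal_run_scan : Prop := ∀ (start_pos : Int) (requests : List Int) (direction : String), Dom_run_scan start_pos requests direction → Spec_run_scan start_pos requests direction (run_scan start_pos requests direction)

-- ===== LEMMAS AND PROOFS =====

-- total movement of visiting the stops of l in order, starting from c
def pvCost : Int → List Int → Int
  | _, [] => 0
  | c, x :: xs => |x - c| + pvCost x xs

theorem pvFoldA (l : List Int) : ∀ (t c : Int) (p : List Int),
    l.foldl pvStepA (t, c, p) = (t + pvCost c l, l.getLastD c, p ++ l) := by
  induction l with
  | nil => intro t c p; simp [pvCost]
  | cons x xs ih =>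
    intro t c p
    rw [List.foldl_cons, show pvStepA (t, c, p) x = (t + |x - c|, x, p ++ [x]) from rfl, ih]
    rw [show (x :: xs).getLastD c = xs.getLastD x from List.getLastD_cons]
    simp [pvCost, add_assoc]

theorem pvCost_asc (l : List Int) : ∀ c : Int, l.Pairwise (· ≤ ·) → (∀ x ∈ l, c ≤ x) →
    pvCost c l = l.getLastD c - c := by
  induction l with
  | nil => intro c _ _; simp [pvCost]
  | cons x xs ih =>
    intro c h1 h2
    rw [show (x :: xs).getLastD c = xs.getLastD x from List.getLastD_cons]
    have hx : c ≤ x := h2 x List.mem_cons_self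
    rw [show pvCost c (x :: xs) = |x - c| + pvCost x xs from rfl,
        ih x (List.Pairwise.sublist (List.sublist_cons_self x xs) h1)
          (fun y hy => List.rel_of_pairwise_cons h1 hy)]
    have : |x - c| = x - c := abs_of_nonneg (by omega)
    omega

theorem pvCost_desc (l : List Int) : ∀ c : Int, l.Pairwise (fun a b => b ≤ a) → (∀ x ∈ l, x ≤ c) →
    pvCost c l = c - l.getLastD c := by
  induction l with
  | nil => intro c _ _; simp [pvCost]
  | cons x xs ih =>
    intro c h1 h2
    rw [show (x :: xs).getLastD c = xs.getLastD x from List.getLastD_cons]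
    have hx : x ≤ c := h2 x List.mem_cons_self
    rw [show pvCost c (x :: xs) = |x - c| + pvCost x xs from rfl,
        ih x (List.Pairwise.sublist (List.sublist_cons_self x xs) h1)
          (fun y hy => List.rel_of_pairwise_cons h1 hy)]
    have : |x - c| = c - x := by rw [abs_sub_comm]; exact abs_of_nonneg (by omega)
    omega

-- pvCost along a cons of an ascending list: first step |h0 - c|, then telescoping
theorem pvCost_asc_cons (c h0 : Int) (hs : List Int) (hpw : (h0 :: hs).Pairwise (· ≤ ·)) :
    pvCost c (h0 :: hs) = |h0 - c| + (hs.getLastD h0 - h0) := by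
  rw [show pvCost c (h0 :: hs) = |h0 - c| + pvCost h0 hs from rfl,
      pvCost_asc hs h0 (List.Pairwise.sublist (List.sublist_cons_self h0 hs) hpw)
        (fun y hy => List.rel_of_pairwise_cons hpw hy)]

-- sorting twice (A sorts a filtered copy of the already-sorted list, B sorts the filtered original)
theorem pvSortPerm (xs ys : List Int) (h : xs.Perm ys) :
    PySem.List.sorted xs (fun r => r) false = PySem.List.sorted ys (fun r => r) false :=
  PySem.List.sorted_eq_sorted_of_perm xs ys (fun r => r) (fun _ _ hh => hh) h

-- Python's sorted(xs, reverse=True) on Ints is the reverse of the ascending sort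
theorem pvSortRev (xs : List Int) :
    PySem.List.sorted xs (fun r => r) true = (PySem.List.sorted xs (fun r => r) false).reverse := by
  refine PySem.List.eq_of_perm_of_pairwise_le_of_injective (fun x : Int => -x) neg_injective
    ?_ ?_ ?_
  · exact (PySem.List.sorted_perm xs _ true).trans
      ((List.reverse_perm _).trans (PySem.List.sorted_perm xs _ false)).symm
  · exact (PySem.List.sorted_pairwise_rev xs (fun r => r)).imp (fun hle => neg_le_neg hle)
  · exact (List.pairwise_reverse.mpr (PySem.List.sorted_pairwise xs (fun r => r))).imp
      (fun hle => neg_le_neg hle)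

theorem pvFilterSorted (p : Int → Bool) (requests : List Int) :
    ((PySem.List.sorted requests (fun r => r) false).filter p).Perm (requests.filter p) :=
  (PySem.List.sorted_perm requests (fun r => r) false).filter p

-- the one-pass partition loop of B = the two filters
theorem pvFoldPart (P : Int → Prop) [DecidablePred P] (l : List Int) : ∀ a b : List Int,
    l.foldl (fun (s : List Int × List Int) r =>
      if P r then (s.1 ++ [r], s.2) else (s.1, s.2 ++ [r])) (a, b)
    = (a ++ l.filter (fun r => decide (P r)), b ++ l.filter (fun r => !decide (P r))) := by
  induction l with
  | nil => intro a b; simp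
  | cons x xs ih =>
    intro a b
    by_cases hx : P x <;> simp [hx, ih]

-- pvCost from c along the reverse of a nonempty ascending list, in closed form
theorem pvCost_rev (c : Int) (L : List Int) (h1 : L.Pairwise (· ≤ ·)) (hne : L ≠ []) :
    pvCost c L.reverse = |L.getLastD 0 - c| + (L.getLastD 0 - L.headD 0) := by
  have hM : L.reverse ≠ [] := by simpa using hne
  obtain ⟨d, ds, hE⟩ := List.exists_cons_of_ne_nil hM
  have hdlast : L.getLast? = some d := by
    rw [← List.head?_reverse, hE]; rfl
  have hdsl : ds.getLastD d = L.headD 0 := by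
    have h2' : (d :: ds).getLast? = L.head? := by rw [← hE, List.getLast?_reverse]
    cases L with
    | nil => exact absurd rfl hne
    | cons y ys =>
      have : (d :: ds).getLastD 0 = y := by
        rw [List.getLastD_eq_getLast?, h2']; rfl
      rw [← List.getLastD_cons, this]; rfl
  have hrevPw : (d :: ds).Pairwise (fun a b => b ≤ a) := by
    rw [← hE]; exact List.pairwise_reverse.mpr h1
  have hLd : L.getLastD 0 = d := by rw [List.getLastD_eq_getLast?, hdlast]; rfl
  rw [hE, show pvCost c (d :: ds) = |d - c| + pvCost d ds from rfl,
      pvCost_desc ds d (List.Pairwise.sublist (List.sublist_cons_self d ds) hrevPw)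
        (fun y hy => List.rel_of_pairwise_cons hrevPw hy),
      hdsl, hLd]

-- elements of the ascending sort of a filtered list satisfy the filter's predicate
theorem pvMemSorted (p : Int → Bool) (xs : List Int) (y : Int)
    (hy : y ∈ PySem.List.sorted (xs.filter p) (fun r => r) false) : p y = true := by
  have := (PySem.List.mem_sorted (xs.filter p) (fun r => r) false y).mp hy
  exact (List.mem_filter.mp this).2

-- the "up" branch of A = the "up" branch of B, over abstract sorted halves
theorem pvBranchUp (start : Int) (U L : List Int)
    (hUpw : U.Pairwise (· ≤ ·)) (hUmem : ∀ x ∈ U, start ≤ x) (hLpw : L.Pairwise (· ≤ ·)) :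
    (let s1 := U.foldl pvStepA (0, start, [start])
     let s2 := if U = [] ∨ U.getLast? ≠ some (4999 : Int) then
                 (s1.1 + |(4999 : Int) - s1.2.1|, (4999 : Int), s1.2.2 ++ [(4999 : Int)])
               else s1
     let s3 := L.reverse.foldl pvStepA s2
     ((s3.1, s3.2.2) : Int × List Int)) =
    (let u := U.getLastD start
     ((u - start) + |(4999 : Int) - u| +
        (if L ≠ [] then |L.getLastD 0 - 4999| + (L.getLastD 0 - L.headD 0) else 0),
      start :: (U ++ (if U = [] ∨ U.getLast? ≠ some (4999 : Int) then [(4999 : Int)] else []) ++ L.reverse))) := by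
  have hUc : pvCost start U = U.getLastD start - start := pvCost_asc U start hUpw hUmem
  have hLc : pvCost 4999 L.reverse =
      (if L ≠ [] then |L.getLastD 0 - 4999| + (L.getLastD 0 - L.headD 0) else 0) := by
    by_cases hLnil : L = []
    · subst hLnil; simp [pvCost]
    · rw [pvCost_rev 4999 L hLpw hLnil, if_pos hLnil]
  simp only [pvFoldA]
  rw [← hLc]
  split_ifs with hg
  · rw [pvFoldA]
    simp only [Prod.mk.injEq]
    refine ⟨?_, by simp⟩
    rw [hUc]; ring
  · rcases not_or.mp hg with ⟨hne, hlast⟩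
    rw [not_not] at hlast
    have hu : U.getLastD start = 4999 := by rw [List.getLastD_eq_getLast?, hlast]; rfl
    rw [pvFoldA]
    simp only [Prod.mk.injEq]
    refine ⟨?_, by simp⟩
    rw [hUc, hu, sub_self, abs_zero]; ring

-- the "down" branch of A = the "down" branch of B, over abstract sorted halves
theorem pvBranchDown (start : Int) (L H : List Int)
    (hLpw : L.Pairwise (· ≤ ·)) (hLmem : ∀ x ∈ L, x ≤ start) (hHpw : H.Pairwise (· ≤ ·)) :
    (let s1 := L.reverse.foldl pvStepA (0, start, [start])
     let s2 := if L.reverse = [] ∨ L.reverse.getLast? ≠ some (0 : Int) then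
                 (s1.1 + |(0 : Int) - s1.2.1|, (0 : Int), s1.2.2 ++ [(0 : Int)])
               else s1
     let s3 := H.foldl pvStepA s2
     ((s3.1, s3.2.2) : Int × List Int)) =
    (let l := L.headD start
     ((start - l) + |l| +
        (if H ≠ [] then |H.headD 0| + (H.getLastD 0 - H.headD 0) else 0),
      start :: (L.reverse ++ (if L = [] ∨ L.head? ≠ some (0 : Int) then [(0 : Int)] else []) ++ H))) := by
  have hcur : L.reverse.getLastD start = L.headD start := by
    rw [List.getLastD_eq_getLast?, List.getLast?_reverse]
    cases L with
    | nil => rfl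
    | cons z zs => rfl
  have hDc : pvCost start L.reverse = start - L.headD start := by
    rw [pvCost_desc L.reverse start (List.pairwise_reverse.mpr hLpw)
        (fun y hy => hLmem y (List.mem_reverse.mp hy)), hcur]
  have hHc : pvCost 0 H =
      (if H ≠ [] then |H.headD 0| + (H.getLastD 0 - H.headD 0) else 0) := by
    by_cases hHnil : H = []
    · subst hHnil; simp [pvCost]
    · obtain ⟨h0, hs, hHE⟩ := List.exists_cons_of_ne_nil hHnil
      subst hHE
      rw [pvCost_asc_cons 0 h0 hs hHpw, if_pos (by simp)]
      simp only [List.getLastD_cons, List.headD_cons, sub_zero]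
  simp only [pvFoldA, List.getLast?_reverse, List.reverse_eq_nil_iff]
  rw [← hHc]
  split_ifs with hg
  · rw [pvFoldA]
    simp only [Prod.mk.injEq]
    refine ⟨?_, by simp⟩
    have habs : |(0 : Int) - L.reverse.getLastD start| = |L.headD start| := by
      rw [hcur, show (0 : Int) - L.headD start = -(L.headD start) by ring, abs_neg]
    rw [habs, hDc]; ring
  · rcases not_or.mp hg with ⟨hne, hhead⟩
    rw [not_not] at hhead
    have hl : L.headD start = 0 := by
      cases L with
      | nil => exact absurd rfl hne
      | cons z zs => simpa using congrArg (Option.getD · start) hhead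
    rw [pvFoldA]
    simp only [Prod.mk.injEq]
    refine ⟨?_, by simp⟩
    rw [hcur, hl, hDc, hl]
    simp

-- ===== VERDICT (by name: the statement is the Claim_ definition above) =====
theorem run_scan_spec : Claim_equal_run_scan := by
  intro start_pos requests direction _
  unfold Spec_run_scan run_scan run_scan_alt
  by_cases hd : (direction == "up") = true
  · -- direction = "up"
    have hdir : direction = "up" := by simpa using hd
    subst hdir
    simp only [if_pos hd]
    rw [pvFoldPart (fun r => r < start_pos ∨ (r = start_pos ∧ ("up" : String) ≠ "up")) requests [] []]
    have hfl : requests.filter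
        (fun r => decide (r < start_pos ∨ (r = start_pos ∧ ("up" : String) ≠ "up")))
        = requests.filter (fun r => decide (r < start_pos)) := by
      apply List.filter_congr; intro x _; simp
    have hfh : requests.filter
        (fun r => !decide (r < start_pos ∨ (r = start_pos ∧ ("up" : String) ≠ "up")))
        = requests.filter (fun r => decide (r ≥ start_pos)) := by
      apply List.filter_congr; intro x _
      simp only [← decide_not, decide_eq_decide]
      constructor
      · intro h; by_contra h2; exact h (Or.inl (by omega))
      · intro h h2
        rcases h2 with h2 | ⟨_, hne⟩
        · omega
        · exact hne rfl
    rw [hfl, hfh]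
    simp only [List.nil_append]
    rw [pvSortPerm _ _ (pvFilterSorted (fun r => decide (r ≥ start_pos)) requests),
        pvSortRev, pvSortPerm _ _ (pvFilterSorted (fun r => decide (r < start_pos)) requests)]
    exact pvBranchUp start_pos
      (PySem.List.sorted (requests.filter (fun r => decide (r ≥ start_pos))) (fun r => r) false)
      (PySem.List.sorted (requests.filter (fun r => decide (r < start_pos))) (fun r => r) false)
      (PySem.List.sorted_pairwise _ _)
      (fun y hy => by have := pvMemSorted _ requests y hy; simp at this; omega)
      (PySem.List.sorted_pairwise _ _)
  · -- direction ≠ "up"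
    have hdir : direction ≠ "up" := by simpa using hd
    simp only [hd, Bool.false_eq_true, if_false]
    rw [pvFoldPart (fun r => r < start_pos ∨ (r = start_pos ∧ direction ≠ "up")) requests [] []]
    have hfl : requests.filter
        (fun r => decide (r < start_pos ∨ (r = start_pos ∧ direction ≠ "up")))
        = requests.filter (fun r => decide (r ≤ start_pos)) := by
      apply List.filter_congr; intro x _
      simp only [decide_eq_decide]
      constructor
      · intro h; rcases h with h | ⟨h, _⟩ <;> omega
      · intro h
        rcases lt_or_eq_of_le h with h' | h'
        · exact Or.inl h'
        · exact Or.inr ⟨h', hdir⟩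
    have hfh : requests.filter
        (fun r => !decide (r < start_pos ∨ (r = start_pos ∧ direction ≠ "up")))
        = requests.filter (fun r => decide (r > start_pos)) := by
      apply List.filter_congr; intro x _
      simp only [← decide_not, decide_eq_decide]
      constructor
      · intro h; by_contra h2
        rcases lt_or_eq_of_le (le_of_not_gt h2) with h' | h'
        · exact h (Or.inl h')
        · exact h (Or.inr ⟨h', hdir⟩)
      · intro h h2
        rcases h2 with h2 | ⟨h2, _⟩ <;> omega
    rw [hfl, hfh]
    simp only [List.nil_append]
    rw [pvSortPerm _ _ (pvFilterSorted (fun r => decide (r > start_pos)) requests),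
        pvSortRev, pvSortPerm _ _ (pvFilterSorted (fun r => decide (r ≤ start_pos)) requests)]
    exact pvBranchDown start_pos
      (PySem.List.sorted (requests.filter (fun r => decide (r ≤ start_pos))) (fun r => r) false)
      (PySem.List.sorted (requests.filter (fun r => decide (r > start_pos))) (fun r => r) false)
      (PySem.List.sorted_pairwise _ _)
      (fun y hy => by have := pvMemSorted _ requests y hy; simp at this; omega)
      (PySem.List.sorted_pairwise _ _)
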